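-- pv_equiv track=rewrite | github.com/fwilsch/cubicpts | tests/test_tr_linear.py | points_brute
-- ===== SOURCE A (Python) =====
-- def points_brute(bound, a):
--     solutions = []
--     for x in range(-bound, bound):
--         for y in range(-bound, bound):
--             lhs = x*x - a*y*y
--             rhs = y-1
--             for z in range(-bound, bound):
--                 if z == 0:
--                     continue
--                 if lhs*z - rhs == 0:
--                     solutions.append((x, y, z))
--     return solutions
-- ===== SOURCE B (Python) =====
-- def points_brute(bound, a):
--     def zs(x, y):
--         lhs = x*x - a*y*y
--         rhs = y - 1
--         if lhs == 0:
--             return list(range(-bound, 0)) + list(range(1, bound)) if rhs == 0 else []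
--         q, r = divmod(rhs, lhs)
--         return [q] if r == 0 and q != 0 and -bound <= q < bound else []
--     return [(x, y, z)
--             for x in range(-bound, bound)
--             for y in range(-bound, bound)
--             for z in zs(x, y)]
-- ===== Notes on version B (the rewrite author's own statement) =====
-- stated objective: faster
-- what changed: The inner scan over z is replaced by solving the linear equation lhs*z = rhs directly (divisibility test + one division), with the degenerate lhs=0 case enumerated explicitly.
import Mathlib
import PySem

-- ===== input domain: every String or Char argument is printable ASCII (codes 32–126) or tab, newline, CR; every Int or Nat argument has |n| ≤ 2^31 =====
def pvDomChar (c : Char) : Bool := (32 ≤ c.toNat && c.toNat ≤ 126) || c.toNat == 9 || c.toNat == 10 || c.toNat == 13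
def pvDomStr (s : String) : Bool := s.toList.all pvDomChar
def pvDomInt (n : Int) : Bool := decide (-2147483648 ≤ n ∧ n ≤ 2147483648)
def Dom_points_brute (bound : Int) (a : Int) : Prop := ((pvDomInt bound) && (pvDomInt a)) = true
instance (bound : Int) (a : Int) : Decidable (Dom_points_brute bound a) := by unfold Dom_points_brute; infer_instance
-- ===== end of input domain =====

-- B replaces A's inner scan over z by solving the linear equation lhs*z = rhs directly
-- (divisibility test + one floor division), enumerating the degenerate lhs = 0 case explicitly.

-- ===== PORT A =====
def points_brute (bound : Int) (a : Int) : List (Int × Int × Int) :=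
  (PySem.List.pyRange (-bound) bound).foldl (fun acc x =>
    (PySem.List.pyRange (-bound) bound).foldl (fun acc y =>
      let lhs := x * x - a * y * y
      let rhs := y - 1
      (PySem.List.pyRange (-bound) bound).foldl (fun acc z =>
        if z = 0 then acc
        else if lhs * z - rhs = 0 then acc ++ [(x, y, z)] else acc) acc) acc) []

-- ===== PORT B =====
-- zs(x, y): the z-solutions of lhs*z = rhs, found by division instead of scanning
def zsols (bound : Int) (a : Int) (x : Int) (y : Int) : List Int :=
  let lhs := x * x - a * y * y
  let rhs := y - 1
  if lhs = 0 then
    if rhs = 0 then PySem.List.pyRange (-bound) 0 ++ PySem.List.pyRange 1 bound else []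
  else
    let q := PySem.Int.floordiv rhs lhs
    let r := PySem.Int.mod rhs lhs
    if r = 0 ∧ q ≠ 0 ∧ -bound ≤ q ∧ q < bound then [q] else []

def points_brute_alt (bound : Int) (a : Int) : List (Int × Int × Int) :=
  (PySem.List.pyRange (-bound) bound).flatMap (fun x =>
    (PySem.List.pyRange (-bound) bound).flatMap (fun y =>
      (zsols bound a x y).map (fun z => (x, y, z))))

-- ===== PRECONDITION & SPEC =====
def Spec_points_brute (bound : Int) (a : Int) (out : List (Int × Int × Int)) : Prop := out = points_brute_alt bound a
instance (bound : Int) (a : Int) (out : List (Int × Int × Int)) : Decidable (Spec_points_brute bound a out) := by unfold Spec_points_brute; infer_instance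

-- ===== CLAIM (what is proved, stated in full; the proofs are below) =====
def Claim_equal_points_brute : Prop := ∀ (bound : Int) (a : Int), Dom_points_brute bound a → Spec_points_brute bound a (points_brute bound a)

-- ===== LEMMAS AND PROOFS =====

-- filtering a step-1 range by "z = z0" yields [z0] exactly when z0 is in the range
lemma filter_pyRange_eq_single (lo hi z0 : Int) (p : Int → Bool)
    (hp : ∀ z, p z = true ↔ z = z0) :
    (PySem.List.pyRange lo hi).filter p = if lo ≤ z0 ∧ z0 < hi then [z0] else [] := by
  have key : ∀ n : Nat, ∀ lo : Int, (hi - lo).toNat = n →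
      (PySem.List.pyRange lo hi).filter p = if lo ≤ z0 ∧ z0 < hi then [z0] else [] := by
    intro n
    induction n with
    | zero =>
      intro lo h0
      rw [PySem.List.pyRange_one_eq_nil (by omega)]
      simp only [List.filter_nil]
      split
      · omega
      · rfl
    | succ n ih =>
      intro lo h0
      have hlt : lo < hi := by omega
      rw [PySem.List.pyRange_one_cons hlt, List.filter_cons]
      by_cases hz : lo = z0
      · rw [if_pos (by rw [hp]; exact hz)]
        rw [ih (lo + 1) (by omega)]
        rw [if_neg (by omega), if_pos (by omega)]
        rw [hz]
      · rw [if_neg (by simp only [hp]; exact hz)]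
        rw [ih (lo + 1) (by omega)]
        by_cases hin : lo + 1 ≤ z0 ∧ z0 < hi
        · rw [if_pos hin, if_pos (by omega)]
        · rw [if_neg hin, if_neg (by omega)]
  exact key _ lo rfl

-- a predicate that is false everywhere filters to []
lemma filter_false_of_iff (l : List Int) (p : Int → Bool) (hp : ∀ z, p z = false) :
    l.filter p = [] := by
  simp [List.filter_eq_nil_iff, hp]

-- the nonzero elements of range(-b, b) are range(-b, 0) ++ range(1, b)
lemma filter_ne_zero_pyRange (b : Int) :
    (PySem.List.pyRange (-b) b).filter (fun z => !(z == 0)) =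
      PySem.List.pyRange (-b) 0 ++ PySem.List.pyRange 1 b := by
  by_cases h : b ≤ 0
  · rw [PySem.List.pyRange_one_eq_nil (by omega), PySem.List.pyRange_one_eq_nil (by omega),
      PySem.List.pyRange_one_eq_nil (by omega)]
    rfl
  · have h : (0:Int) < b := by omega
    rw [PySem.List.pyRange_one_append (-b) 0 b (by omega) (by omega),
      PySem.List.pyRange_one_cons (show (0:Int) < b from h)]
    rw [List.filter_append]
    have h1 : (PySem.List.pyRange (-b) 0).filter (fun z => !(z == 0)) = PySem.List.pyRange (-b) 0 := by
      apply List.filter_eq_self.mpr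
      intro z hz
      have := PySem.List.mem_pyRange_one.mp hz
      simp; omega
    have h2 : ((0:Int) :: PySem.List.pyRange (0+1) b).filter (fun z => !(z == 0)) = PySem.List.pyRange 1 b := by
      simp only [List.filter_cons]
      norm_num
      intro z hz1 hz2
      omega
    rw [h1, h2]

-- A's inner z-loop appends exactly the z-solutions that zsols computes
lemma inner_eq (b x y lhs rhs : Int) (acc : List (Int × Int × Int)) :
    (PySem.List.pyRange (-b) b).foldl (fun acc z =>
        if z = 0 then acc
        else if lhs * z - rhs = 0 then acc ++ [(x, y, z)] else acc) acc =
    acc ++ ((if lhs = 0 then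
        if rhs = 0 then PySem.List.pyRange (-b) 0 ++ PySem.List.pyRange 1 b else []
      else
        if PySem.Int.mod rhs lhs = 0 ∧ PySem.Int.floordiv rhs lhs ≠ 0 ∧
            -b ≤ PySem.Int.floordiv rhs lhs ∧ PySem.Int.floordiv rhs lhs < b then
          [PySem.Int.floordiv rhs lhs]
        else []).map (fun z => (x, y, z))) := by
  have hA : (PySem.List.pyRange (-b) b).foldl (fun acc z =>
        if z = 0 then acc
        else if lhs * z - rhs = 0 then acc ++ [(x, y, z)] else acc) acc =
      acc ++ ((PySem.List.pyRange (-b) b).filter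
        (fun z => !(z == 0) && (lhs * z - rhs == 0))).map (fun z => (x, y, z)) := by
    rw [← PySem.List.foldl_append_if (fun z => !(z == 0) && (lhs * z - rhs == 0))
      (fun z => (x, y, z)) (PySem.List.pyRange (-b) b) acc]
    congr 1
    funext acc z
    by_cases h0 : z = 0 <;> by_cases h1 : lhs * z - rhs = 0 <;> simp [h0, h1]
  rw [hA]
  by_cases hl : lhs = 0
  · by_cases hr : rhs = 0
    · subst hl; subst hr
      simp only [reduceIte]
      have hfe : (PySem.List.pyRange (-b) b).filter (fun z => !(z == 0) && ((0:Int) * z - 0 == 0)) =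
          (PySem.List.pyRange (-b) b).filter (fun z => !(z == 0)) := by
        apply List.filter_congr
        intro z _
        simp
      rw [hfe, filter_ne_zero_pyRange]
    · subst hl
      simp only [reduceIte, if_neg hr]
      rw [filter_false_of_iff (PySem.List.pyRange (-b) b)
            (fun z => !(z == 0) && ((0:Int) * z - rhs == 0)) (by intro z; simp; omega)]
  · simp only [if_neg hl]
    by_cases hm : PySem.Int.mod rhs lhs = 0
    · set z0 := PySem.Int.floordiv rhs lhs with hz0
      have hmul : z0 * lhs = rhs := by
        have := PySem.Int.floordiv_mul_add_mod rhs lhs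
        rw [hm, ← hz0] at this; omega
      have hiff : ∀ z : Int, lhs * z - rhs = 0 ↔ z = z0 := by
        intro z
        constructor
        · intro h
          have : lhs * z = lhs * z0 := by rw [mul_comm lhs z0, hmul]; omega
          exact mul_left_cancel₀ hl this
        · intro h; subst h; rw [mul_comm, hmul, sub_self]
      by_cases hz : z0 = 0
      · rw [filter_false_of_iff]
        · have : ¬ (PySem.Int.mod rhs lhs = 0 ∧ z0 ≠ 0 ∧ -b ≤ z0 ∧ z0 < b) := by simp [hz]
          simp [this]
        · intro z
          simp only [Bool.and_eq_false_iff]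
          by_cases h0 : z = 0
          · left; simp [h0]
          · right; simp only [beq_eq_false_iff_ne, ne_eq]
            intro hc
            exact h0 (by rw [hiff z] at hc; omega)
      · rw [filter_pyRange_eq_single (-b) b z0 _ (by
          intro z
          simp only [Bool.and_eq_true, beq_iff_eq, Bool.not_eq_eq_eq_not, Bool.not_true,
            beq_eq_false_iff_ne, ne_eq]
          constructor
          · rintro ⟨_, hc⟩; exact (hiff z).mp hc
          · intro h; subst h; exact ⟨hz, (hiff z0).mpr rfl⟩)]
        by_cases hin : -b ≤ z0 ∧ z0 < b
        · simp [hin, hz, hm]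
        · simp [hin]
    · have : ¬ (PySem.Int.mod rhs lhs = 0 ∧ PySem.Int.floordiv rhs lhs ≠ 0 ∧
          -b ≤ PySem.Int.floordiv rhs lhs ∧ PySem.Int.floordiv rhs lhs < b) := by tauto
      rw [if_neg this, filter_false_of_iff (PySem.List.pyRange (-b) b)
            (fun z => !(z == 0) && (lhs * z - rhs == 0)) (by
          intro z
          simp only [Bool.and_eq_false_iff]
          right
          simp only [beq_eq_false_iff_ne, ne_eq]
          intro hc
          exact hm ((PySem.Int.mod_eq_zero_iff_dvd rhs lhs).mpr ⟨z, by linarith [hc]⟩))]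

-- ===== VERDICT (by name: the statement is the Claim_ definition above) =====
theorem points_brute_spec : Claim_equal_points_brute := by
  intro bound a _
  unfold Spec_points_brute points_brute points_brute_alt
  have hmid : ∀ (x : Int) (acc : List (Int × Int × Int)),
      (PySem.List.pyRange (-bound) bound).foldl (fun acc y =>
        let lhs := x * x - a * y * y
        let rhs := y - 1
        (PySem.List.pyRange (-bound) bound).foldl (fun acc z =>
          if z = 0 then acc
          else if lhs * z - rhs = 0 then acc ++ [(x, y, z)] else acc) acc) acc =
      acc ++ (PySem.List.pyRange (-bound) bound).flatMap (fun y =>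
        (zsols bound a x y).map (fun z => (x, y, z))) := by
    intro x acc
    rw [← PySem.List.foldl_append_eq_flatMap]
    congr 1
    funext acc y
    exact inner_eq bound x y (x * x - a * y * y) (y - 1) acc
  have houter : (PySem.List.pyRange (-bound) bound).foldl (fun acc x =>
      (PySem.List.pyRange (-bound) bound).foldl (fun acc y =>
        let lhs := x * x - a * y * y
        let rhs := y - 1
        (PySem.List.pyRange (-bound) bound).foldl (fun acc z =>
          if z = 0 then acc
          else if lhs * z - rhs = 0 then acc ++ [(x, y, z)] else acc) acc) acc) [] =
      (PySem.List.pyRange (-bound) bound).foldl (fun acc x =>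
        acc ++ (PySem.List.pyRange (-bound) bound).flatMap (fun y =>
          (zsols bound a x y).map (fun z => (x, y, z)))) [] := by
    congr 1
    funext acc x
    exact hmid x acc
  rw [houter, PySem.List.foldl_append_eq_flatMap]
  simp
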